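-- pv_equiv track=rewrite | github.com/ahm1378/final_project_optimation | genetic/original_technosaze_project/properties.py | extract_story
-- ===== SOURCE A (Python) =====
-- def extract_story(data_output):
--     result = {}
--     for data in data_output:
--         if data['story'] in result:
--             if data['frame_type'] == 'Column':
--                 # newlist = sorted(data, key=lambda d: d['y2'])
--                 result[data['story']].append(data)
--
--         else:
--             result[data['story']]=[]
--             result[data['story']].append(data)
--     for x in result:
--         result[x] = sorted(result[x], key=lambda d: d['label'])
--
--     return result
-- ===== SOURCE B (Python) =====
-- def extract_story(data_output):
--     # Two-pass decomposition: group everything by story first, then filter+sort each group.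
--     groups = {}
--     for rec in data_output:
--         groups.setdefault(rec['story'], []).append(rec)
--     out = {}
--     for story, group in groups.items():
--         kept = [group[0]] + [r for r in group[1:] if r['frame_type'] == 'Column']
--         out[story] = sorted(kept, key=lambda d: d['label'])
--     return out
-- ===== Notes on version B (the rewrite author's own statement) =====
-- stated objective: alternative
-- what changed: A filters while grouping (branching on whether the story key already exists and appending conditionally); B first groups every record by story in one unconditional setdefault pass, then in a second pass rebuilds each group as its first record plus the 'Column' records and sorts it by label.
import Mathlib
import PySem

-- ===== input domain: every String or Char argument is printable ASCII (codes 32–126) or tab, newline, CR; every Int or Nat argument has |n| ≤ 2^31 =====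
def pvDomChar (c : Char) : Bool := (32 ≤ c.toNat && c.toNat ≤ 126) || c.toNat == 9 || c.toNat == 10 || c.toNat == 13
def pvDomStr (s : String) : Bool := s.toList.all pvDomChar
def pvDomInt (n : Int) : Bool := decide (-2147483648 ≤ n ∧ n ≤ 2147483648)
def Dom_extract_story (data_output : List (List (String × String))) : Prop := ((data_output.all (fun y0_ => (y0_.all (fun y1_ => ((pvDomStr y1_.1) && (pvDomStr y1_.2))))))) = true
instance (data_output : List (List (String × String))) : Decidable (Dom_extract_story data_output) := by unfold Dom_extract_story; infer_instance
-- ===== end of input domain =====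

-- B regroups in two passes (unconditional grouping by story, then keep-first-plus-Columns and sort per group)
-- instead of A's filter-while-grouping single pass; equivalence of the returned value is proved on all inputs.
-- Pre_ excludes exactly the inputs where the Python A raises KeyError.


-- shared helper: Python's data[k] on a record dict (default "" is never hit inside Pre_)
def pvGetS (r : List (String × String)) (k : String) : String :=
  ((PySem.Dict.mk r).get? k).getD ""

-- ===== PORT A =====
def extract_story (data_output : List (List (String × String))) : List (String × List (List (String × String))) :=
  let result : PySem.Dict String (List (List (String × String))) :=
    data_output.foldl (fun result data =>
      if result.contains (pvGetS data "story") then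
        (if pvGetS data "frame_type" == "Column" then
          result.insert (pvGetS data "story") (result.getD (pvGetS data "story") [] ++ [data])
        else result)
      else
        result.insert (pvGetS data "story") [data]) PySem.Dict.empty
  result.items.map (fun p => (p.1, PySem.List.sorted p.2 (fun d => pvGetS d "label") false))

-- ===== PORT B =====
-- keep the first record of a group plus its later 'Column' records ([group[0]] + [... if 'Column'])
def pvKeep (g : List (List (String × String))) : List (List (String × String)) :=
  match g with
  | [] => []
  | h :: t => h :: t.filter (fun r => pvGetS r "frame_type" == "Column")

def extract_story_alt (data_output : List (List (String × String))) : List (String × List (List (String × String))) :=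
  let groups : PySem.Dict String (List (List (String × String))) :=
    data_output.foldl (fun groups rec =>
      groups.modify (pvGetS rec "story") [] (· ++ [rec])) PySem.Dict.empty
  groups.items.map (fun p => (p.1, PySem.List.sorted (pvKeep p.2) (fun d => pvGetS d "label") false))

-- ===== PRECONDITION & SPEC =====
def pvHasKey (r : List (String × String)) (k : String) : Bool := (PySem.Dict.mk r).contains k

-- Pre_ excludes (a) inputs on which the Python A raises KeyError — a record without 'story'; a record whose
-- story was seen earlier but lacking 'frame_type'; a kept record (first of its story, or 'Column') lacking
-- 'label' — and (b) records with duplicate keys in the association list, unrepresentable as a Python dict.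
def Pre_extract_story (data_output : List (List (String × String))) : Prop :=
  (∀ r ∈ data_output, (r.map Prod.fst).Nodup ∧ pvHasKey r "story" = true) ∧
  ∀ i, i < data_output.length →
    ((∃ j, j < i ∧ pvGetS data_output[j]! "story" = pvGetS data_output[i]! "story") →
        pvHasKey data_output[i]! "frame_type" = true) ∧
    (((∀ j, j < i → pvGetS data_output[j]! "story" ≠ pvGetS data_output[i]! "story") ∨
        pvGetS data_output[i]! "frame_type" = "Column") →
        pvHasKey data_output[i]! "label" = true)
instance (data_output : List (List (String × String))) : Decidable (Pre_extract_story data_output) := by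
  unfold Pre_extract_story; infer_instance

def pvWitness_extract_story : (List (List (String × String))) :=
  [[("story", "s1"), ("frame_type", "Beam"), ("label", "a")],
   [("story", "s1"), ("frame_type", "Column"), ("label", "b")],
   [("story", "s2"), ("frame_type", "Column"), ("label", "c")]]

def Spec_extract_story (data_output : List (List (String × String))) (out : List (String × List (List (String × String)))) : Prop := out = extract_story_alt data_output
instance (data_output : List (List (String × String))) (out : List (String × List (List (String × String)))) : Decidable (Spec_extract_story data_output out) := by unfold Spec_extract_story; infer_instance

-- ===== CLAIM (what is proved, stated in full; the proofs are below) =====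
def Claim_equal_extract_story : Prop := ∀ (data_output : List (List (String × String))), Dom_extract_story data_output → Pre_extract_story data_output → Spec_extract_story data_output (extract_story data_output)

-- ===== LEMMAS AND PROOFS =====

theorem pvKeep_append (g : List (List (String × String))) (r : List (String × String)) (hg : g ≠ []) :
    pvKeep (g ++ [r]) =
      pvKeep g ++ (if pvGetS r "frame_type" == "Column" then [r] else [r].filter (fun r => pvGetS r "frame_type" == "Column")) := by
  cases g with
  | nil => exact absurd rfl hg
  | cons h t => simp [pvKeep, List.filter_append]

-- invariant of the two grouping loops: equal keys (nodup), B's groups nonempty, A's value = pvKeep of B's value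
theorem pv_fold_rel (xs : List (List (String × String)))
    (dA dB : PySem.Dict String (List (List (String × String))))
    (hk : dA.keys = dB.keys) (hnd : dB.keys.Nodup)
    (hne : ∀ s, dB.contains s = true → dB.getD s [] ≠ [])
    (hv : ∀ s, dA.getD s [] = pvKeep (dB.getD s [])) :
    (xs.foldl (fun result data =>
      if result.contains (pvGetS data "story") then
        (if pvGetS data "frame_type" == "Column" then
          result.insert (pvGetS data "story") (result.getD (pvGetS data "story") [] ++ [data])
        else result)
      else
        result.insert (pvGetS data "story") [data]) dA).keys
      = (xs.foldl (fun groups rec =>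
          groups.modify (pvGetS rec "story") [] (· ++ [rec])) dB).keys ∧
    (xs.foldl (fun groups rec =>
      groups.modify (pvGetS rec "story") [] (· ++ [rec])) dB).keys.Nodup ∧
    (∀ s, (xs.foldl (fun result data =>
      if result.contains (pvGetS data "story") then
        (if pvGetS data "frame_type" == "Column" then
          result.insert (pvGetS data "story") (result.getD (pvGetS data "story") [] ++ [data])
        else result)
      else
        result.insert (pvGetS data "story") [data]) dA).getD s []
      = pvKeep ((xs.foldl (fun groups rec =>
          groups.modify (pvGetS rec "story") [] (· ++ [rec])) dB).getD s [])) := by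
  induction xs generalizing dA dB with
  | nil => exact ⟨hk, hnd, hv⟩
  | cons r t ih =>
    simp only [List.foldl_cons]
    set s0 := pvGetS r "story" with hs0
    have hcont : dA.contains s0 = dB.contains s0 := by
      rw [PySem.Dict.contains_eq_decide_mem_keys, PySem.Dict.contains_eq_decide_mem_keys, hk]
    by_cases hc : dB.contains s0 = true
    · -- existing story: A appends iff Column; B always appends
      have hgne : dB.getD s0 [] ≠ [] := hne s0 hc
      have hkeysB : (dB.modify s0 [] (· ++ [r])).keys = dB.keys := by
        rw [PySem.Dict.keys_modify, PySem.Dict.keys_insert_of_contains _ _ hc]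
      have hcontB : ∀ s, (dB.modify s0 [] (· ++ [r])).contains s = dB.contains s := by
        intro s
        rw [PySem.Dict.contains_eq_decide_mem_keys, PySem.Dict.contains_eq_decide_mem_keys, hkeysB]
      have hgetB : ∀ s, (dB.modify s0 [] (· ++ [r])).getD s []
          = if s = s0 then dB.getD s0 [] ++ [r] else dB.getD s [] := by
        intro s; exact PySem.Dict.getD_modify dB s0 s [] _
      by_cases hcol : pvGetS r "frame_type" == "Column"
      · rw [hcont, if_pos hc, if_pos hcol]
        apply ih
        · rw [PySem.Dict.keys_insert_of_contains _ _ (hcont ▸ hc), hk, hkeysB]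
        · rw [hkeysB]; exact hnd
        · intro s hs
          rw [hcontB] at hs
          rw [hgetB]
          split
          · simp
          · exact hne s hs
        · intro s
          rw [PySem.Dict.getD_insert, hgetB]
          split
          · subst s; rw [pvKeep_append _ _ hgne, hv, if_pos hcol]
          · exact hv s
      · rw [hcont, if_pos hc, if_neg (by simpa using hcol)]
        apply ih
        · rw [hk, hkeysB]
        · rw [hkeysB]; exact hnd
        · intro s hs
          rw [hcontB] at hs
          rw [hgetB]
          split
          · simp
          · exact hne s hs
        · intro s
          rw [hgetB]
          split
          · subst s; rw [pvKeep_append _ _ hgne, hv, if_neg (by simpa using hcol)]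
            simp [List.filter, Bool.of_not_eq_true hcol]
          · exact hv s
    · -- new story: both create the group [r]
      have hc' : dB.contains s0 = false := by simpa using hc
      have hgB : dB.getD s0 [] = [] := PySem.Dict.getD_of_not_contains dB [] hc'
      have hkeysB : (dB.modify s0 [] (· ++ [r])).keys = dB.keys ++ [s0] := by
        rw [PySem.Dict.keys_modify, PySem.Dict.keys_insert_of_not_contains _ _ hc']
      have hcontB : ∀ s, (dB.modify s0 [] (· ++ [r])).contains s = (dB.contains s || s == s0) := by
        intro s
        rw [PySem.Dict.contains_eq_decide_mem_keys, PySem.Dict.contains_eq_decide_mem_keys, hkeysB]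
        simp only [List.mem_append, List.mem_singleton]
        by_cases h : s ∈ dB.keys <;> by_cases h2 : s = s0 <;> simp [h, h2]
      have hgetB : ∀ s, (dB.modify s0 [] (· ++ [r])).getD s []
          = if s = s0 then dB.getD s0 [] ++ [r] else dB.getD s [] := by
        intro s; exact PySem.Dict.getD_modify dB s0 s [] _
      rw [hcont, if_neg hc]
      apply ih
      · rw [PySem.Dict.keys_insert_of_not_contains _ _ (by rw [hcont]; exact hc'), hk, hkeysB]
      · rw [hkeysB]
        refine List.nodup_append.mpr ⟨hnd, List.nodup_singleton s0, ?_⟩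
        intro a ha b hb
        rw [List.mem_singleton] at hb
        rw [PySem.Dict.contains_eq_decide_mem_keys, decide_eq_false_iff_not] at hc'
        intro hEq
        exact hc' (hb ▸ hEq ▸ ha)
      · intro s hs
        rw [hcontB] at hs
        rw [hgetB]
        rcases Bool.or_eq_true_iff.mp hs with h | h
        · have hne' : s ≠ s0 := by
            intro hEq; subst hEq; rw [hc'] at h; exact Bool.false_ne_true h
          rw [if_neg hne']; exact hne s h
        · have : s = s0 := by simpa using h
          subst this; rw [if_pos rfl]; simp
      · intro s
        rw [PySem.Dict.getD_insert, hgetB]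
        split
        · subst s; rw [hgB]; simp [pvKeep]
        · exact hv s

-- ===== VERDICT (by name: the statement is the Claim_ definition above) =====
theorem extract_story_spec : Claim_equal_extract_story := by
  intro xs _ _
  unfold Spec_extract_story extract_story extract_story_alt
  dsimp only
  obtain ⟨hk, hnd, hv⟩ := pv_fold_rel xs PySem.Dict.empty PySem.Dict.empty
    (by rfl) (by simp [PySem.Dict.keys_empty]) (by simp [PySem.Dict.contains_empty])
    (by simp [PySem.Dict.getD_empty, pvKeep])
  rw [PySem.Dict.items_eq_map_keys _ (hk ▸ hnd) [], PySem.Dict.items_eq_map_keys _ hnd [], hk,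
    List.map_map, List.map_map]
  apply List.map_congr_left
  intro k _
  simp only [Function.comp]
  rw [hv k]
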